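-- pv_equiv track=rewrite | github.com/dobermanch/dev-quests | src/python/challenges/problems/maximum_score_after_splitting_a_string_test.py | Solution
-- ===== SOURCE A (Python) =====
-- def Solution(s: str) -> int:
--     oneCount = 0
--     for i in range(len(s)):
--         if s[i] == '1':
--             oneCount += 1
--
--     zeroCount = 0
--     score = 0
--     for i in range(len(s) - 1):
--         if s[i] == '0':
--             zeroCount += 1
--         else:
--             oneCount -= 1
--
--         score = max(score, zeroCount + oneCount)
--
--     return score
-- ===== SOURCE B (Python) =====
-- def Solution(s: str) -> int:
--     chars = list(s)
--     ones = chars.count('1')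
--     return max([0] + [ones + 2 * chars[:i].count('0') - i for i in range(1, len(chars))])
-- ===== Notes on version B (the rewrite author's own statement) =====
-- stated objective: simpler
-- what changed: Replaces A's two manual accumulator loops (running one-count, zero-count and score) with a one-liner: count the ones once, then take max over a comprehension of the closed-form per-split score ones + 2*zeros(prefix i) - i, with 0 prepended for the empty split list.
import Mathlib
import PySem

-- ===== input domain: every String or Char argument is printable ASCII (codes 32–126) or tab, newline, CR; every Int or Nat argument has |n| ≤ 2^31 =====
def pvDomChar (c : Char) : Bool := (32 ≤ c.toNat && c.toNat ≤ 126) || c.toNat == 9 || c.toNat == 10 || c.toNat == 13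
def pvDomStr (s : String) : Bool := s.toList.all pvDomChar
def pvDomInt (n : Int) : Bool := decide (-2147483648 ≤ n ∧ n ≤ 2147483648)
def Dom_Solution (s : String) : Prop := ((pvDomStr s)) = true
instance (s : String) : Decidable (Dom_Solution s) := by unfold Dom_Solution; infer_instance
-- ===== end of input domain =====

-- B replaces A's two accumulator loops by a single max over a comprehension of the
-- closed-form per-split score ones + 2*zeros(prefix) - i; simpler, not faster.

-- ===== PORT A =====
-- A-side helper: the body of A's second loop (one iteration over state (zeroCount, oneCount, score))
def stepA (st : Int × Int × Int) (c : Char) : Int × Int × Int :=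
  let z := if c == '0' then st.1 + 1 else st.1
  let o := if c == '0' then st.2.1 else st.2.1 - 1
  (z, o, max st.2.2 (z + o))

def Solution (s : String) : Int :=
  let cs := s.toList
  let oneCount : Int := cs.foldl (fun oc c => if c == '1' then oc + 1 else oc) 0
  let r := cs.dropLast.foldl stepA (0, oneCount, 0)
  r.2.2

-- ===== PORT B =====
def Solution_alt (s : String) : Int :=
  let chars := s.toList
  let ones : Int := (PySem.List.count chars '1' : Int)
  let cands : List Int :=
    (0 : Int) :: (PySem.List.pyRange 1 (chars.length : Int) 1).map
      (fun i => ones + 2 * ((PySem.List.count (PySem.List.slice chars none (some i)) '0' : Nat) : Int) - i)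
  match PySem.List.max? cands (fun y => y) with
  | some v => v
  | none => 0

-- ===== PRECONDITION & SPEC =====
def Spec_Solution (s : String) (out : Int) : Prop := out = Solution_alt s
instance (s : String) (out : Int) : Decidable (Spec_Solution s out) := by unfold Spec_Solution; infer_instance

-- ===== CLAIM (what is proved, stated in full; the proofs are below) =====
def Claim_equal_Solution : Prop := ∀ (s : String), Dom_Solution s → Spec_Solution s (Solution s)

-- ===== LEMMAS AND PROOFS =====

-- characterization of A's second loop: final state components in closed form
theorem foldA_eq (l : List Char) (z o sc : Int) :
    l.foldl stepA (z, o, sc)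
      = (z + (l.count '0' : Int),
         o - (l.countP (fun c => !(c == '0')) : Int),
         ((List.range l.length).map
            (fun k => z + ((l.take (k+1)).count '0' : Int)
                      + o - ((l.take (k+1)).countP (fun c => !(c == '0')) : Int))).foldl max sc) := by
  induction l generalizing z o sc with
  | nil => simp
  | cons c t ih =>
    simp only [List.foldl_cons, stepA]
    rw [ih]
    simp only [Prod.mk.injEq, List.count_cons, List.countP_cons, List.length_cons,
      List.range_succ_eq_map, List.map_cons, List.map_map, List.foldl_cons,
      List.take_succ_cons, List.take_zero, List.count_nil, List.countP_nil]
    refine ⟨?_, ?_, ?_⟩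
    · by_cases h : c = '0' <;> first
        | (simp [h]; omega)
        | simp [h]
    · by_cases h : c = '0' <;> first
        | (simp [h]; omega)
        | simp [h]
    · congr 1
      · by_cases h : c = '0' <;> first
        | (simp [h]; omega)
        | simp [h]
      · apply List.map_congr_left
        intro k _
        simp only [Function.comp]
        by_cases h : c = '0' <;> simp [h] <;> omega

theorem count_one_fold (l : List Char) :
    l.foldl (fun oc c => if c == '1' then oc + 1 else oc) (0 : Int) = (l.count '1' : Int) := by
  rw [PySem.List.foldl_count_if (fun c => c == '1') l 0]
  simp [List.count]

theorem Solution_spec : Claim_equal_Solution := by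
  intro s _
  unfold Spec_Solution Solution Solution_alt
  simp only []
  set cs := s.toList with hcs
  set n := cs.length with hn
  -- B side: max of cons = running max
  rw [PySem.List.max?_id_cons]
  simp only [PySem.List.count_eq]
  -- A side
  rw [count_one_fold, foldA_eq]
  simp only []
  rw [PySem.List.pyRange_one 1 (n : Int), List.map_map]
  have hlen : cs.dropLast.length = n - 1 := by simp [hn]
  have hto : ((n : Int) - 1).toNat = n - 1 := by omega
  rw [hlen, hto]
  apply congrArg (List.foldl max 0)
  apply List.map_congr_left
  intro k hk
  have hk' : k < n - 1 := List.mem_range.mp hk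
  have hsl : PySem.List.slice cs none (some ((1 : Int) + (k : Int))) = cs.take (k + 1) := by
    rw [PySem.List.slice_to cs (by omega)]
    congr 1
    omega
  simp only [Function.comp, hsl]
  have htk : cs.dropLast.take (k + 1) = cs.take (k + 1) := by
    rw [List.dropLast_eq_take, List.take_take]
    congr 1
    omega
  rw [htk]
  have hlen2 : (cs.take (k + 1)).length = k + 1 := by
    rw [List.length_take]
    omega
  have hsplit : (cs.take (k+1)).length
      = (cs.take (k+1)).countP (fun c => c == '0') + (cs.take (k+1)).countP (fun c => !(c == '0')) := by
    simpa using List.length_eq_countP_add_countP (fun c => c == '0') (l := cs.take (k+1))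
  have hcnt : (cs.take (k+1)).count '0' = (cs.take (k+1)).countP (fun c => c == '0') := rfl
  rw [hcnt]
  omega
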